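-- pv_equiv track=rewrite | github.com/JialiLiuu/2025FALL | project2/pareto_optimal.py | staircase_presorted
-- ===== SOURCE A (Python) =====
-- def staircase_presorted(points):
--     """
--     Computes Pareto-optimal points in O(n) time,
--     assuming points are sorted by x ascending.
--     Removes previously dominated points.
--     """
--     if not points:
--         return []
--
--     staircase = []
--     for point in points:
--         # Remove points dominated by the new point
--         while staircase and staircase[-1][1] <= point[1]:
--             staircase.pop()
--         staircase.append(point)
--
--     return staircase
-- ===== SOURCE B (Python) =====
-- def staircase_presorted(points):
--     """Backward single pass with a running maximum y; keep a point iff its y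
--     strictly exceeds every later point's y, then reverse back to input order."""
--     res = []
--     best_y = None
--     for p in reversed(points):
--         if best_y is None or p[1] > best_y:
--             res.append(p)
--             best_y = p[1]
--     res.reverse()
--     return res
-- ===== Notes on version B (the rewrite author's own statement) =====
-- stated objective: alternative
-- what changed: Replaces the forward scan with a pop-while stack by a single backward pass keeping a running maximum y (keep iff y > best_y), then a final reverse.
import Mathlib
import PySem

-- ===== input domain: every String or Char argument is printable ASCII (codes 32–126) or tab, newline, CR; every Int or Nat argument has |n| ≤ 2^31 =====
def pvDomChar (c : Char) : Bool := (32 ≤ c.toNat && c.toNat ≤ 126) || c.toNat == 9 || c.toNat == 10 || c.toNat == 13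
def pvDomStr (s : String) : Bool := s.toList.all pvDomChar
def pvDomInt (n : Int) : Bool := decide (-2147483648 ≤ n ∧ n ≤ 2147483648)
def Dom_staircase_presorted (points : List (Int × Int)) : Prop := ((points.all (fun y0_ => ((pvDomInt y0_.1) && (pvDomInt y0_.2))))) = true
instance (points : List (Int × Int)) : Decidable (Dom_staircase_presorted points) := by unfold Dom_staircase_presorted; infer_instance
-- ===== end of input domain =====

-- B replaces A's forward scan with a pop-while stack by a backward pass with a running maximum
-- (objective: alternative decomposition, same cost).

-- ===== PORT A =====
-- stack represented head-first (head = top of the Python list `staircase`);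
-- the while-pop loop is the dropWhile, the append is the cons, and the final
-- return reverses back to bottom-first (Python list) order.
def pvStepA (st : List (Int × Int)) (p : Int × Int) : List (Int × Int) :=
  p :: st.dropWhile (fun q => decide (q.2 ≤ p.2))

def staircase_presorted (points : List (Int × Int)) : List (Int × Int) :=
  if points = [] then []
  else (points.foldl pvStepA []).reverse

-- ===== PORT B =====
-- state = (res in Python append order, best_y as Option Int for Python's None)
def pvStepB (acc : List (Int × Int) × Option Int) (p : Int × Int) :
    List (Int × Int) × Option Int :=
  match acc.2 with
  | none => (acc.1 ++ [p], some p.2)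
  | some b => if b < p.2 then (acc.1 ++ [p], some p.2) else acc

def staircase_presorted_alt (points : List (Int × Int)) : List (Int × Int) :=
  (points.reverse.foldl pvStepB ([], none)).1.reverse

-- ===== PRECONDITION & SPEC =====
def Spec_staircase_presorted (points : List (Int × Int)) (out : List (Int × Int)) : Prop := out = staircase_presorted_alt points
instance (points : List (Int × Int)) (out : List (Int × Int)) : Decidable (Spec_staircase_presorted points out) := by unfold Spec_staircase_presorted; infer_instance

-- ===== CLAIM (what is proved, stated in full; the proofs are below) =====
def Claim_equal_staircase_presorted : Prop := ∀ (points : List (Int × Int)), Dom_staircase_presorted points → Spec_staircase_presorted points (staircase_presorted points)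

-- ===== LEMMAS AND PROOFS =====

/-- Canonical characterisation: keep a point iff its y strictly exceeds every later y. -/
def Fstair : List (Int × Int) → List (Int × Int)
  | [] => []
  | p :: rest => if rest.all (fun q => decide (q.2 < p.2)) then p :: Fstair rest else Fstair rest

theorem Fstair_ne_nil : ∀ (l : List (Int × Int)), l ≠ [] → Fstair l ≠ [] := by
  intro l hl
  induction l with
  | nil => exact absurd rfl hl
  | cons p rest ih =>
    simp only [Fstair]
    split
    · simp
    · rename_i h
      have hr : rest ≠ [] := by
        rintro rfl; simp at h
      exact ih hr

theorem Fstair_head_max : ∀ (l : List (Int × Int)) (f : Int × Int) (fs : List (Int × Int)),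
    Fstair l = f :: fs → f ∈ l ∧ ∀ q ∈ l, q.2 ≤ f.2 := by
  intro l
  induction l with
  | nil => intro f fs h; simp [Fstair] at h
  | cons p rest ih =>
    intro f fs h
    simp only [Fstair] at h
    split at h
    · rename_i hall
      obtain ⟨rfl, rfl⟩ : p = f ∧ Fstair rest = fs := by
        constructor
        · exact (List.cons.injEq .. ▸ h).1
        · exact (List.cons.injEq .. ▸ h).2
      refine ⟨List.mem_cons_self, ?_⟩
      intro q hq
      rcases List.mem_cons.mp hq with rfl | hq
      · exact le_refl _
      · have := List.all_eq_true.mp hall q hq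
        simp at this; omega
    · rename_i hall
      obtain ⟨hf, hmax⟩ := ih f fs h
      refine ⟨List.mem_cons_of_mem _ hf, ?_⟩
      intro q hq
      rcases List.mem_cons.mp hq with rfl | hq
      · -- some r ∈ rest has r.2 ≥ q.2, and r.2 ≤ f.2
        simp only [List.all_eq_true] at hall
        push Not at hall
        obtain ⟨r, hr, hrq⟩ := hall
        have h1 : ¬ (r.2 < q.2) := by simpa using hrq
        have h2 := hmax r hr
        omega
      · exact hmax q hq

-- ---------- A-side ----------

theorem dropWhile_eq_filter_of_pairwise (p : Int × Int) :
    ∀ (st : List (Int × Int)), st.Pairwise (fun a b => a.2 < b.2) →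
      st.dropWhile (fun q => decide (q.2 ≤ p.2)) = st.filter (fun q => decide (p.2 < q.2)) := by
  intro st
  induction st with
  | nil => intro _; rfl
  | cons a t ih =>
    intro hp
    have hpt := List.Pairwise.of_cons hp
    have hrel := List.pairwise_cons.mp hp |>.1
    by_cases h : a.2 ≤ p.2
    · rw [List.dropWhile_cons_of_pos (by simpa using h),
        List.filter_cons_of_neg (by simp; omega)]
      exact ih hpt
    · rw [List.dropWhile_cons_of_neg (by simpa using h),
        List.filter_cons_of_pos (by simp; omega)]
      have : t.filter (fun q => decide (p.2 < q.2)) = t := by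
        apply List.filter_eq_self.mpr
        intro q hq
        have := hrel q hq
        simp; omega
      rw [this]

theorem pairwise_stepA (st : List (Int × Int)) (p : Int × Int)
    (h : st.Pairwise (fun a b => a.2 < b.2)) :
    (pvStepA st p).Pairwise (fun a b => a.2 < b.2) := by
  unfold pvStepA
  rw [dropWhile_eq_filter_of_pairwise p st h]
  apply List.pairwise_cons.mpr
  constructor
  · intro b hb
    have := List.of_mem_filter hb
    simpa using this
  · exact List.Pairwise.filter _ h

theorem foldA_eq : ∀ (l st : List (Int × Int)), st.Pairwise (fun a b => a.2 < b.2) →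
    l.foldl pvStepA st =
      (Fstair l).reverse ++ st.filter (fun a => l.all (fun q => decide (q.2 < a.2))) := by
  intro l
  induction l with
  | nil =>
    intro st _
    simp [Fstair]
  | cons p l' ih =>
    intro st hp
    have hstep := pairwise_stepA st p hp
    rw [List.foldl_cons, ih _ hstep]
    unfold pvStepA
    rw [dropWhile_eq_filter_of_pairwise p st hp]
    by_cases hk : l'.all (fun q => decide (q.2 < p.2))
    · -- p is kept
      have hF : Fstair (p :: l') = p :: Fstair l' := by simp [Fstair, hk]
      rw [hF]
      simp only [List.reverse_cons, List.filter_cons]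
      rw [if_pos (by simpa using hk)]
      rw [List.filter_filter]
      have hfe : ∀ (a : Int × Int),
          ((l'.all fun q => decide (q.2 < a.2)) && decide (p.2 < a.2)) =
          ((p :: l').all fun q => decide (q.2 < a.2)) := by
        intro a; simp only [List.all_cons]; rw [Bool.and_comm]
      simp only [hfe, List.append_assoc]
      rfl
    · -- p is dropped
      have hF : Fstair (p :: l') = Fstair l' := by
        simp only [Fstair]
        rw [if_neg hk]
      rw [hF]
      simp only [List.filter_cons]
      rw [if_neg (by simpa using hk)]
      rw [List.filter_filter]
      -- some r ∈ l' has ¬ r.2 < p.2, so "greater than all of l'" implies "greater than p.2"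
      have hex : ∃ r ∈ l', p.2 ≤ r.2 := by
        by_contra hc
        push Not at hc
        apply hk
        exact List.all_eq_true.mpr (fun q hq => by have := hc q hq; simp; omega)
      obtain ⟨r, hr, hrp⟩ := hex
      have hfe : ∀ (a : Int × Int),
          ((l'.all fun q => decide (q.2 < a.2)) && decide (p.2 < a.2)) =
          ((p :: l').all fun q => decide (q.2 < a.2)) := by
        intro a
        simp only [List.all_cons]
        by_cases h : (l'.all fun q => decide (q.2 < a.2)) = true
        · have hra := List.all_eq_true.mp h r hr
          have hpa : p.2 < a.2 := by simp at hra; omega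
          simp [h, hpa]
        · have h' : (l'.all fun q => decide (q.2 < a.2)) = false := Bool.eq_false_iff.mpr h
          simp [h']
      simp only [hfe]

theorem staircase_eq_F (points : List (Int × Int)) :
    staircase_presorted points = Fstair points := by
  unfold staircase_presorted
  by_cases h : points = []
  · subst h; rfl
  · rw [if_neg h, foldA_eq points [] List.Pairwise.nil]
    simp

-- ---------- B-side ----------

theorem foldB_eq : ∀ (l : List (Int × Int)),
    l.reverse.foldl pvStepB ([], none) =
      ((Fstair l).reverse, (Fstair l).head?.map (·.2)) := by
  intro l
  induction l with
  | nil => rfl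
  | cons p l' ih =>
    rw [List.reverse_cons, List.foldl_append, ih]
    simp only [List.foldl_cons, List.foldl_nil]
    rcases hF : Fstair l' with _ | ⟨f, fs⟩
    · -- l' is empty (Fstair of nonempty is nonempty)
      have hl' : l' = [] := by
        by_contra hne
        exact Fstair_ne_nil l' hne hF
      subst hl'
      simp [Fstair, pvStepB]
    · obtain ⟨hf, hmax⟩ := Fstair_head_max l' f fs hF
      simp only [List.head?_cons, Option.map_some]
      by_cases hlt : f.2 < p.2
      · have hkeep : l'.all (fun q => decide (q.2 < p.2)) = true := by
          apply List.all_eq_true.mpr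
          intro q hq
          have := hmax q hq
          simp; omega
        have hFp : Fstair (p :: l') = p :: Fstair l' := by simp [Fstair, hkeep]
        simp [pvStepB, hlt, hFp, hF]
      · have hkeep : ¬ (l'.all (fun q => decide (q.2 < p.2)) = true) := by
          simp only [List.all_eq_true]
          push Not
          exact ⟨f, hf, by simp; omega⟩
        have hFp : Fstair (p :: l') = Fstair l' := by
          simp only [Fstair]
          rw [if_neg hkeep]
        simp [pvStepB, hlt, hFp, hF]

theorem alt_eq_F (points : List (Int × Int)) :
    staircase_presorted_alt points = Fstair points := by
  unfold staircase_presorted_alt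
  rw [foldB_eq]
  simp

-- ===== VERDICT (by name: the statement is the Claim_ definition above) =====
theorem staircase_presorted_spec : Claim_equal_staircase_presorted := by
  intro points _
  unfold Spec_staircase_presorted
  rw [staircase_eq_F, alt_eq_F]
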